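-- pv_equiv track=rewrite | github.com/2ndbw/Baru-Adapters | baru_isodata_classifier.py | baru_inverse
-- ===== SOURCE A (Python) =====
-- ADJUSTMENTS = {
--     # ── Target cluster count (K) ──────────────────────────────────────────
--     'K_raise_5':       +12,   # K += 5: more target clusters → better separation
--     'K_raise_2':       + 5,   # K += 2: modest increase
--     'K_lower_2':       - 7,   # K -= 2: too few classes → confusion rises
--     'K_lower_5':       -15,   # K -= 5: severe under-clustering
--
--     # ── Split threshold THETA_S ───────────────────────────────────────────
--     'split_loosen':    + 6,   # lower THETA_S: split more aggressively → finer map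
--     'split_tighten':   - 4,   # raise THETA_S: fewer splits → coarser map
--
--     # ── Merge threshold THETA_C ───────────────────────────────────────────
--     'merge_tighten':   + 8,   # raise THETA_C: less merging → preserve classes
--     'merge_loosen':    -10,   # lower THETA_C: aggressive merging → class collapse
--
--     # ── Min pixels per cluster THETA_M ────────────────────────────────────
--     'minpix_lower':    + 4,   # keep smaller clusters → more rare-class coverage
--     'minpix_raise':    - 3,   # discard more clusters → lose rare classes
--
--     # ── Iteration count ───────────────────────────────────────────────────
--     'iter_more':       + 3,   # more iterations → better convergence
--     'iter_fewer':      - 2,   # fewer iterations → premature stop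
-- }
--
-- def baru_inverse(shortfall):
--     """
--     Given a Kappa shortfall, return the minimum parameter adjustments
--     to close the gap. Greedy: largest positive gain first.
--     """
--     if shortfall <= 0:
--         return []
--     result    = []
--     remaining = shortfall
--     pool = sorted(
--         [(name, g) for name, g in ADJUSTMENTS.items() if g > 0],
--         key=lambda x: x[1], reverse=True
--     )
--     while remaining > 0:
--         for name, gain in pool:
--             if gain <= remaining:
--                 result.append(name)
--                 remaining -= gain
--                 break
--         else:
--             result.append(pool[-1][0])
--             remaining -= pool[-1][1]
--     return result
-- ===== SOURCE B (Python) =====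
-- ADJUSTMENTS = {
--     'K_raise_5':       +12,
--     'K_raise_2':       + 5,
--     'K_lower_2':       - 7,
--     'K_lower_5':       -15,
--     'split_loosen':    + 6,
--     'split_tighten':   - 4,
--     'merge_tighten':   + 8,
--     'merge_loosen':    -10,
--     'minpix_lower':    + 4,
--     'minpix_raise':    - 3,
--     'iter_more':       + 3,
--     'iter_fewer':      - 2,
-- }
--
-- def baru_inverse(shortfall):
--     """Greedy shortfall closure by batching: one pass with floor division
--     instead of a per-pick while loop."""
--     if shortfall <= 0:
--         return []
--     pool = sorted(
--         [(name, g) for name, g in ADJUSTMENTS.items() if g > 0],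
--         key=lambda x: x[1], reverse=True
--     )
--     result = []
--     remaining = shortfall
--     for name, gain in pool:
--         count = remaining // gain
--         result.extend([name] * count)
--         remaining -= count * gain
--     if remaining > 0:
--         result.append(pool[-1][0])
--     return result
-- ===== Notes on version B (the rewrite author's own statement) =====
-- stated objective: alternative
-- what changed: Replaces the while-loop with inner linear rescan (pick one largest affordable gain per iteration) by a single pass over the sorted pool that takes remaining // gain copies of each adjustment at once via floor division, with one final smallest-gain append if a positive remainder is left.
import Mathlib
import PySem

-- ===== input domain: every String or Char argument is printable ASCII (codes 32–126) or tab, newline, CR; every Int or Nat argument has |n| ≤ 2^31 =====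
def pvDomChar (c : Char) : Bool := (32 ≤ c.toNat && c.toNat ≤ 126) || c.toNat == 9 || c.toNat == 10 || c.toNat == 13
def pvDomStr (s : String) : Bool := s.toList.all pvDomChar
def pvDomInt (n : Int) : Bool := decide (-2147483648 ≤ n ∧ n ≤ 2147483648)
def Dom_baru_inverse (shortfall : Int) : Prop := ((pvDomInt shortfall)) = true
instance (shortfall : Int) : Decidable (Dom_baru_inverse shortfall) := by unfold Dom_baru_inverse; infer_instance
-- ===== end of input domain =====

-- B replaces A's per-pick while-loop by one pass over the sorted pool taking remaining // gain
-- copies of each adjustment at once (objective: alternative / asymptotically fewer iterations).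

-- ===== PORT A =====
-- the module constant ADJUSTMENTS (a dict, insertion order)
def pyADJUSTMENTS : PySem.Dict String Int := PySem.Dict.ofList
  [("K_raise_5", 12), ("K_raise_2", 5), ("K_lower_2", -7), ("K_lower_5", -15),
   ("split_loosen", 6), ("split_tighten", -4), ("merge_tighten", 8), ("merge_loosen", -10),
   ("minpix_lower", 4), ("minpix_raise", -3), ("iter_more", 3), ("iter_fewer", -2)]

-- pool = sorted([(name, g) for name, g in ADJUSTMENTS.items() if g > 0], key=..x[1], reverse=True)
def poolA : List (String × Int) :=
  PySem.List.sorted ((pyADJUSTMENTS.items).filter (fun p => decide (0 < p.2))) (fun p => p.2) true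

-- the body of A's while-iteration: the for/break picks the FIRST pool entry with gain ≤ remaining
-- (= List.find?); the for/else falls back to pool[-1] (pyGet? at -1; the getD default is
-- unreachable since poolA is a non-empty constant, where Python would raise IndexError).
def pickA (remaining : Int) : String × Int :=
  match poolA.find? (fun p => decide (p.2 ≤ remaining)) with
  | some p => p
  | none => (PySem.List.pyGet? poolA (-1)).getD ("", 0)

-- A's `while remaining > 0` loop; result.append before the next iteration = cons here.
-- fuel only makes the recursion structural: shortfall.toNat iterations always suffice
-- because each iteration lowers remaining by a positive gain.
def loopA : Nat → Int → List String
  | 0, _ => []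
  | fuel + 1, remaining =>
    if 0 < remaining then
      (pickA remaining).1 :: loopA fuel (remaining - (pickA remaining).2)
    else []

def baru_inverse (shortfall : Int) : List String :=
  if shortfall ≤ 0 then [] else loopA shortfall.toNat shortfall

-- ===== PORT B =====
-- one batching step of B's for-loop over the pool:
-- count = remaining // gain; result.extend([name] * count); remaining -= count * gain
-- ([name] * count with count ≥ 0 here; .toNat matches Python's empty list for count < 0)
def batchStep (st : List String × Int) (p : String × Int) : List String × Int :=
  (st.1 ++ List.replicate (PySem.Int.floordiv st.2 p.2).toNat p.1,
   st.2 - PySem.Int.floordiv st.2 p.2 * p.2)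

def baru_inverse_alt (shortfall : Int) : List String :=
  if shortfall ≤ 0 then []
  else
    let pool := PySem.List.sorted ((pyADJUSTMENTS.items).filter (fun p => decide (0 < p.2)))
                  (fun p => p.2) true
    let st := pool.foldl batchStep ([], shortfall)
    -- if remaining > 0: result.append(pool[-1][0])   (getD default unreachable: pool non-empty)
    if 0 < st.2 then st.1 ++ [((PySem.List.pyGet? pool (-1)).getD ("", 0)).1] else st.1

-- ===== PRECONDITION & SPEC =====
def Spec_baru_inverse (shortfall : Int) (out : List String) : Prop := out = baru_inverse_alt shortfall
instance (shortfall : Int) (out : List String) : Decidable (Spec_baru_inverse shortfall out) := by unfold Spec_baru_inverse; infer_instance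

-- ===== CLAIM (what is proved, stated in full; the proofs are below) =====
def Claim_equal_baru_inverse : Prop := ∀ (shortfall : Int), Dom_baru_inverse shortfall → Spec_baru_inverse shortfall (baru_inverse shortfall)

-- ===== LEMMAS AND PROOFS =====

-- the pool, evaluated (proof-side literal)
def poolLit : List (String × Int) :=
  [("K_raise_5", 12), ("merge_tighten", 8), ("split_loosen", 6),
   ("K_raise_2", 5), ("minpix_lower", 4), ("iter_more", 3)]

lemma poolA_eq : poolA = poolLit := by decide

-- B's else-branch as a standalone function over the evaluated pool
def batchB (r : Int) : List String :=
  let st := poolLit.foldl batchStep ([], r)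
  if 0 < st.2 then st.1 ++ [((PySem.List.pyGet? poolLit (-1)).getD ("", 0)).1] else st.1

def poolRest : List (String × Int) :=
  [("merge_tighten", 8), ("split_loosen", 6), ("K_raise_2", 5), ("minpix_lower", 4), ("iter_more", 3)]

lemma alt_eq (s : Int) (h : ¬ s ≤ 0) : baru_inverse_alt s = batchB s := by
  simp only [baru_inverse_alt, if_neg h]
  rw [show PySem.List.sorted ((pyADJUSTMENTS.items).filter (fun p => decide (0 < p.2)))
        (fun p => p.2) true = poolLit from poolA_eq]
  rfl

lemma loopA_nonpos (fuel : Nat) (r : Int) (h : r ≤ 0) : loopA fuel r = [] := by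
  cases fuel with
  | zero => rfl
  | succ f => simp only [loopA]; rw [if_neg (by omega)]

lemma foldl_batchStep_cons (rest : List (String × Int)) (a : String) (acc : List String) (r : Int) :
    rest.foldl batchStep (a :: acc, r)
      = (a :: (rest.foldl batchStep (acc, r)).1, (rest.foldl batchStep (acc, r)).2) := by
  induction rest generalizing acc r with
  | nil => rfl
  | cons p ps ih =>
      simp only [List.foldl_cons, batchStep, List.cons_append]
      exact ih _ _

lemma batch12 (r : Int) (h : 12 ≤ r) : batchB r = "K_raise_5" :: batchB (r - 12) := by
  have hd : PySem.Int.floordiv r 12 = r / 12 := PySem.Int.floordiv_eq_ediv_of_pos (by omega)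
  have hd' : PySem.Int.floordiv (r - 12) 12 = (r - 12) / 12 :=
    PySem.Int.floordiv_eq_ediv_of_pos (by omega)
  have hcnt : (PySem.Int.floordiv r 12).toNat = (PySem.Int.floordiv (r - 12) 12).toNat + 1 := by
    rw [hd, hd']; omega
  have hrem : r - PySem.Int.floordiv r 12 * 12 = (r - 12) - PySem.Int.floordiv (r - 12) 12 * 12 := by
    rw [hd, hd']; omega
  simp only [batchB]
  rw [show poolLit = ("K_raise_5", 12) :: poolRest from rfl, List.foldl_cons, List.foldl_cons]
  rw [show batchStep ([], r) ("K_raise_5", 12)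
        = ("K_raise_5" :: List.replicate (PySem.Int.floordiv (r - 12) 12).toNat "K_raise_5",
           (r - 12) - PySem.Int.floordiv (r - 12) 12 * 12) by
    simp only [batchStep, List.nil_append, hcnt, List.replicate_succ, hrem]]
  rw [show batchStep ([], r - 12) ("K_raise_5", 12)
        = (List.replicate (PySem.Int.floordiv (r - 12) 12).toNat "K_raise_5",
           (r - 12) - PySem.Int.floordiv (r - 12) 12 * 12) by
    simp only [batchStep, List.nil_append]]
  rw [foldl_batchStep_cons]
  split_ifs <;> simp

lemma pick12 (r : Int) (h : 12 ≤ r) : pickA r = ("K_raise_5", 12) := by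
  simp only [pickA, poolA_eq, poolLit, List.find?]
  rw [show (decide ((12:Int) ≤ r)) = true by simp [h]]

lemma main_eq (n : Nat) : ∀ r : Int, 0 ≤ r → r.toNat = n →
    ∀ fuel : Nat, n ≤ fuel → loopA fuel r = batchB r := by
  induction n using Nat.strong_induction_on with
  | _ n IH =>
    intro r hr hrn fuel hf
    by_cases h12 : 12 ≤ r
    · obtain ⟨f, rfl⟩ : ∃ f, fuel = f + 1 := ⟨fuel - 1, by omega⟩
      simp only [loopA]
      rw [if_pos (by omega), pick12 r h12, batch12 r h12]
      exact congrArg _ (IH (r - 12).toNat (by omega) _ (by omega) rfl f (by omega))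
    · have hlt : r < 12 := by omega
      interval_cases r
      · exact (loopA_nonpos fuel 0 le_rfl).trans (by decide)
      all_goals (
        obtain ⟨f, rfl⟩ : ∃ f, fuel = f + 1 := ⟨fuel - 1, by omega⟩
        simp only [loopA]
        rw [if_pos (by omega)])
      -- r = 1 .. 11; in each case pickA is a closed term, evaluated by `decide`;
      -- the batchB equation at a closed r is also decided.
      · rw [show pickA 1 = ("iter_more", 3) from by decide, loopA_nonpos f _ (by omega)]; decide
      · rw [show pickA 2 = ("iter_more", 3) from by decide, loopA_nonpos f _ (by omega)]; decide
      · rw [show pickA 3 = ("iter_more", 3) from by decide, loopA_nonpos f _ (by omega)]; decide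
      · rw [show pickA 4 = ("minpix_lower", 4) from by decide, loopA_nonpos f _ (by omega)]; decide
      · rw [show pickA 5 = ("K_raise_2", 5) from by decide, loopA_nonpos f _ (by omega)]; decide
      · rw [show pickA 6 = ("split_loosen", 6) from by decide, loopA_nonpos f _ (by omega)]; decide
      · rw [show pickA 7 = ("split_loosen", 6) from by decide]
        norm_num
        rw [IH 1 (by omega) 1 (by omega) rfl f (by omega)]
        decide
      · rw [show pickA 8 = ("merge_tighten", 8) from by decide, loopA_nonpos f _ (by omega)]; decide
      · rw [show pickA 9 = ("merge_tighten", 8) from by decide]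
        norm_num
        rw [IH 1 (by omega) 1 (by omega) rfl f (by omega)]
        decide
      · rw [show pickA 10 = ("merge_tighten", 8) from by decide]
        norm_num
        rw [IH 2 (by omega) 2 (by omega) rfl f (by omega)]
        decide
      · rw [show pickA 11 = ("merge_tighten", 8) from by decide]
        norm_num
        rw [IH 3 (by omega) 3 (by omega) rfl f (by omega)]
        decide

-- ===== VERDICT (by name: the statement is the Claim_ definition above) =====
theorem baru_inverse_spec : Claim_equal_baru_inverse := by
  intro s _
  unfold Spec_baru_inverse baru_inverse
  by_cases h : s ≤ 0
  · rw [if_pos h, baru_inverse_alt, if_pos h]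
  · rw [if_neg h, alt_eq s h]
    exact main_eq s.toNat s (by omega) rfl s.toNat le_rfl
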